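-- pv_equiv track=rewrite | github.com/schiob/TestingSistemas | ago-dic-2018/David Perez/Practica4/Practica4.py | Led
-- ===== SOURCE A (Python) =====
-- def Led(n):
--     n=str(n)
--     leds = 0
--     for i in range(0, len(n)):
--         if n[i] == '1':
--             leds = leds + 2
--         elif n[i] in '235':
--             leds = leds + 5
--         elif n[i] in '690':
--             leds = leds + 6
--         elif n[i] == '7':
--             leds = leds + 3
--         elif n[i] == '8':
--             leds = leds + 7
--         elif n[i] == '4':
--             leds = leds + 4
--
--     return leds
-- ===== SOURCE B (Python) =====
-- _SEG = (6, 2, 5, 5, 4, 5, 6, 3, 7, 6)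
--
-- def Led(n):
--     n = abs(n)
--     total = _SEG[n % 10]
--     while n >= 10:
--         n //= 10
--         total += _SEG[n % 10]
--     return total
-- ===== Notes on version B (the rewrite author's own statement) =====
-- stated objective: alternative
-- what changed: B never builds str(n): it takes abs(n) and strips decimal digits arithmetically (modulo and floor-division by ten) in a while loop, indexing a fixed segment-count tuple, instead of A's index loop over the string with a six-way if-elif cascade.
import Mathlib
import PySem

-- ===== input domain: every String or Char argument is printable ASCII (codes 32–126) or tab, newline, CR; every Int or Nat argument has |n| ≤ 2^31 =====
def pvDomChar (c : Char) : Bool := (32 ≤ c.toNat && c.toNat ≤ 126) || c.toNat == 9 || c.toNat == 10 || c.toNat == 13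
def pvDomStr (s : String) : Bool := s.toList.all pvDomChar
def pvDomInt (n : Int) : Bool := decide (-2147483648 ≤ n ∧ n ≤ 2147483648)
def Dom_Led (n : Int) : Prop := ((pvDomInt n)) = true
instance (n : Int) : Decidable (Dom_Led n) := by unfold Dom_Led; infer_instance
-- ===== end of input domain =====

-- B never builds str(n): it extracts decimal digits of abs(n) arithmetically (%10, //10 loop)
-- and indexes a fixed segment-count tuple, instead of A's character scan with an if-elif cascade.


-- ===== PORT A =====
-- A's if-elif cascade on the character n[i] (branches in source order).
def ledStep (leds : Int) (c : Char) : Int :=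
  if c = '1' then leds + 2
  else if ['2', '3', '5'].contains c then leds + 5
  else if ['6', '9', '0'].contains c then leds + 6
  else if c = '7' then leds + 3
  else if c = '8' then leds + 7
  else if c = '4' then leds + 4
  else leds

def Led (n : Int) : Int :=
  let s := PySem.Int.toChars n
  (PySem.List.pyRange 0 (s.length : Int)).foldl
    (fun leds i => ledStep leds (PySem.List.pyGetD s i ' ')) 0

-- ===== PORT B =====
-- the tuple _SEG
def pvSeg : List Int := [6, 2, 5, 5, 4, 5, 6, 3, 7, 6]

-- the while loop: while n >= 10: n //= 10; total += _SEG[n % 10]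
def ledLoop (n : Nat) (total : Int) : Int :=
  if 10 ≤ n then ledLoop (n / 10) (total + pvSeg.getD ((n / 10) % 10) 0) else total
termination_by n
decreasing_by exact Nat.div_lt_self (by omega) (by norm_num)

def Led_alt (n : Int) : Int :=
  ledLoop n.natAbs (pvSeg.getD (n.natAbs % 10) 0)

-- ===== PRECONDITION & SPEC =====
def Spec_Led (n : Int) (out : Int) : Prop := out = Led_alt n
instance (n : Int) (out : Int) : Decidable (Spec_Led n out) := by unfold Spec_Led; infer_instance

-- ===== CLAIM =====
def Claim_equal_Led : Prop := ∀ (n : Int), Dom_Led n → Spec_Led n (Led n)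

-- ===== LEMMAS AND PROOFS =====

-- value added by A's cascade for one character
def stepVal (c : Char) : Int :=
  if c = '1' then 2
  else if ['2', '3', '5'].contains c then 5
  else if ['6', '9', '0'].contains c then 6
  else if c = '7' then 3
  else if c = '8' then 7
  else if c = '4' then 4
  else 0

-- contribution of the while loop, as a function of n alone
def ledG (n : Nat) : Int :=
  if 10 ≤ n then pvSeg.getD ((n / 10) % 10) 0 + ledG (n / 10) else 0
termination_by n
decreasing_by exact Nat.div_lt_self (by omega) (by norm_num)

lemma ledStep_eq (acc : Int) (c : Char) : ledStep acc c = acc + stepVal c := by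
  unfold ledStep stepVal
  split_ifs <;> omega

lemma foldl_step (l : List Char) (acc : Int) :
    l.foldl ledStep acc = acc + (l.map stepVal).sum := by
  induction l generalizing acc with
  | nil => simp
  | cons c t ih =>
    rw [List.foldl_cons, ledStep_eq, ih]
    simp only [List.map_cons, List.sum_cons]
    ring

lemma stepVal_digitChar (d : Nat) (h : d < 10) :
    stepVal (Nat.digitChar d) = pvSeg.getD d 0 := by
  interval_cases d <;> decide

lemma core_sum (f : Nat) : ∀ (n : Nat) (ds : List Char), 0 < f → n < 10 ^ f →
    ((Nat.toDigitsCore 10 f n ds).map stepVal).sum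
      = pvSeg.getD (n % 10) 0 + ledG n + ((ds.map stepVal).sum) := by
  induction f with
  | zero => intro n ds hf h; omega
  | succ f ih =>
    intro n ds _ h
    rw [Nat.toDigitsCore]
    by_cases h0 : n / 10 = 0
    · have hn : n < 10 := by omega
      simp only [h0, if_true, List.map_cons, List.sum_cons]
      rw [stepVal_digitChar (n % 10) (by omega), ledG, if_neg (by omega)]
      ring
    · have hn : 10 ≤ n := by omega
      rw [if_neg h0]
      have hdiv : n / 10 < 10 ^ f := by
        rw [Nat.div_lt_iff_lt_mul (by norm_num)]
        calc n < 10 ^ (f + 1) := h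
          _ = 10 ^ f * 10 := by ring
      have hf : 0 < f := by
        rcases Nat.eq_zero_or_pos f with hf0 | hf0
        · subst hf0; omega
        · exact hf0
      rw [ih (n / 10) _ hf hdiv]
      simp only [List.map_cons, List.sum_cons]
      rw [stepVal_digitChar (n % 10) (by omega)]
      conv_rhs => rw [ledG, if_pos hn]
      ring

lemma toDigits_sum (m : Nat) :
    ((Nat.toDigits 10 m).map stepVal).sum = pvSeg.getD (m % 10) 0 + ledG m := by
  have h : m < 10 ^ (m + 1) :=
    lt_of_lt_of_le (Nat.lt_pow_self (by norm_num))
      (Nat.pow_le_pow_right (by norm_num) (Nat.le_succ m))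
  have := core_sum (m + 1) m [] (Nat.succ_pos m) h
  simpa [Nat.toDigits] using this

lemma ledLoop_eq (m : Nat) : ∀ (t : Int), ledLoop m t = t + ledG m := by
  induction m using Nat.strong_induction_on with
  | _ m ih =>
    intro t
    rw [ledLoop, ledG]
    by_cases h : 10 ≤ m
    · rw [if_pos h, if_pos h, ih (m / 10) (Nat.div_lt_self (by omega) (by norm_num))]
      ring
    · rw [if_neg h, if_neg h]; ring

lemma led_chars (n : Int) :
    Led n = ((PySem.Int.toChars n).map stepVal).sum := by
  unfold Led
  rw [PySem.List.foldl_pyRange_zero_pyGetD', foldl_step]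
  ring

-- ===== VERDICT =====
theorem Led_spec : Claim_equal_Led := by
  intro n _
  unfold Spec_Led Led_alt
  rw [led_chars, ledLoop_eq]
  unfold PySem.Int.toChars
  by_cases h : n < 0
  · rw [if_pos h]
    simp only [List.map_cons, List.sum_cons]
    rw [toDigits_sum]
    have : stepVal '-' = 0 := by decide
    rw [this]
    ring
  · rw [if_neg h]
    rw [toDigits_sum]
    have : n.toNat = n.natAbs := by omega
    rw [this]
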